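-- pv_equiv track=rewrite | github.com/YangPatrick/FindHappy | DLMethods/data_generator.py | get_column_distribution
-- ===== SOURCE A (Python) =====
-- def get_column_distribution(data):
--     columns = list(zip(*data))
--     maxs = []
--     mins = []
--     for col in columns:
--         col = set(col)
--         # -8 是一个特殊值
--         if -8 in col:
--             col.remove(-8)
--         maxs.append(max(col))
--         mins.append(min(col))
--     return maxs, mins
-- ===== SOURCE B (Python) =====
-- def get_column_distribution(data):
--     ncols = min(map(len, data), default=0)
--     maxs = [None] * ncols
--     mins = [None] * ncols
--     for row in data:
--         for j in range(ncols):
--             v = row[j]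
--             if v == -8:
--                 continue
--             if maxs[j] is None or v > maxs[j]:
--                 maxs[j] = v
--             if mins[j] is None or v < mins[j]:
--                 mins[j] = v
--     return maxs, mins
-- ===== Notes on version B (the rewrite author's own statement) =====
-- stated objective: alternative
-- what changed: B replaces the transpose-then-per-column set/max/min pass with a single row-wise streaming pass keeping running max/min accumulators per column and skipping -8 as it goes; Pre_ excludes inputs where some column holds only -8, on which A's max() of an empty set raises ValueError.
import Mathlib
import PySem

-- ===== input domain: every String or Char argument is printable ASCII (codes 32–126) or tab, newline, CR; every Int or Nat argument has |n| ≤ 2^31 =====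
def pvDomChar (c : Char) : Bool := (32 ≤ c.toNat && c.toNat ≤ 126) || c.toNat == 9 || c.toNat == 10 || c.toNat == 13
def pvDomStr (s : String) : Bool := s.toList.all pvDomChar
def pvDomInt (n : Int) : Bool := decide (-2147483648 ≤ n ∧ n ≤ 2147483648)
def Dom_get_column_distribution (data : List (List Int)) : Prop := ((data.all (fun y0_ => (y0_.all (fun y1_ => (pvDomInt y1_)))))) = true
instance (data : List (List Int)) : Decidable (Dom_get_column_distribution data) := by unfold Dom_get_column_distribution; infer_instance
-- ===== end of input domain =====

-- B changes the decomposition: a single row-wise streaming pass with running per-column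
-- max/min accumulators instead of A's transpose followed by a per-column set/max/min pass.

-- ===== PORT A =====
-- number of columns zip(*data) yields: 0 for no rows, else the shortest row length
def pvNcols : List (List Int) → Nat
  | [] => 0
  | r :: rs => rs.foldl (fun m s => min m s.length) r.length

-- zip(*data): the list of columns, truncated at the shortest row
-- (exact: Python's zip stops at the first exhausted iterator; zip() of no iterables is empty)
def pyZipStar (data : List (List Int)) : List (List Int) :=
  match data with
  | [] => []
  | r :: rs =>
      (List.range (pvNcols (r :: rs))).map (fun j => (r :: rs).map (fun row => row.getD j 0))

def get_column_distribution (data : List (List Int)) : List Int × List Int :=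
  let columns := pyZipStar data
  columns.foldl
    (fun acc col =>
      let s : PySem.Set Int := PySem.Set.ofList col
      let s := if PySem.Set.contains s (-8) then (PySem.Set.remove? s (-8)).getD s else s
      -- max(col) / min(col); the empty set (ValueError in Python) is excluded by Pre_
      (acc.1 ++ [(PySem.List.max? s (fun x => x)).getD 0],
       acc.2 ++ [(PySem.List.min? s (fun x => x)).getD 0]))
    ([], [])

-- ===== PORT B =====
-- min(map(len, data), default=0)
def pvNcolsB (data : List (List Int)) : Nat :=
  match data.map List.length with
  | [] => 0
  | x :: xs => xs.foldl min x

-- `acc is None or better(v, acc)` — the update test of B's running accumulators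
def pvNeedUpd (cur : Option Int) (better : Int → Int → Bool) (v : Int) : Bool :=
  match cur with
  | none => true
  | some m => better v m

def get_column_distribution_alt (data : List (List Int)) : List Int × List Int :=
  let ncols := pvNcolsB data
  let st := data.foldl
    (fun st row =>
      (List.range ncols).foldl
        (fun st j =>
          let v := row.getD j 0   -- row[j]; in range since j < ncols ≤ len(row)
          if v = -8 then st
          else
            (if pvNeedUpd (st.1.getD j none) (fun a b => b < a) v then st.1.set j (some v) else st.1,
             if pvNeedUpd (st.2.getD j none) (fun a b => a < b) v then st.2.set j (some v) else st.2))
        st)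
    (List.replicate ncols none, List.replicate ncols none)
  -- B returns None entries on all-sentinel columns (outside Pre_, not an Int); 0 stands in here
  (st.1.map (fun o => o.getD 0), st.2.map (fun o => o.getD 0))

-- ===== PRECONDITION & SPEC =====
-- Pre_ excludes exactly the inputs where some column (within the shortest-row width) holds
-- only the sentinel -8: there A's max(set()) raises ValueError (and B's running max stays None,
-- which is not an Int).
def Pre_get_column_distribution (data : List (List Int)) : Prop :=
  ∀ j < pvNcols data, ∃ r ∈ data, r.getD j 0 ≠ -8
instance (data : List (List Int)) : Decidable (Pre_get_column_distribution data) := by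
  unfold Pre_get_column_distribution; infer_instance

def pvWitness_get_column_distribution : List (List Int) := [[1, -8], [2, 3]]

def Spec_get_column_distribution (data : List (List Int)) (out : List Int × List Int) : Prop := out = get_column_distribution_alt data
instance (data : List (List Int)) (out : List Int × List Int) : Decidable (Spec_get_column_distribution data out) := by unfold Spec_get_column_distribution; infer_instance

-- ===== CLAIM (what is proved, stated in full; the proofs are below) =====
def Claim_equal_get_column_distribution : Prop := ∀ (data : List (List Int)), Dom_get_column_distribution data → Pre_get_column_distribution data → Spec_get_column_distribution data (get_column_distribution data)

-- ===== LEMMAS AND PROOFS =====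

-- the j-th column of data (only used for j below every row's length)
def pvCol (data : List (List Int)) (j : Nat) : List Int := data.map (fun r => r.getD j 0)

-- per-element effect of B's two conditional updates
def pvUpMax (m : Option Int) (v : Int) : Option Int :=
  if v = -8 then m else if pvNeedUpd m (fun a b => b < a) v then some v else m
def pvUpMin (m : Option Int) (v : Int) : Option Int :=
  if v = -8 then m else if pvNeedUpd m (fun a b => a < b) v then some v else m

lemma pvNcolsB_eq (data : List (List Int)) : pvNcolsB data = pvNcols data := by
  match data with
  | [] => rfl
  | r :: rs => simp [pvNcolsB, pvNcols, List.foldl_map]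

lemma pyZipStar_eq (data : List (List Int)) :
    pyZipStar data = (List.range (pvNcols data)).map (pvCol data) := by
  match data with
  | [] => simp [pyZipStar, pvNcols]
  | r :: rs => simp [pyZipStar, pvCol]

-- A's pair-building loop is a pair of maps
lemma pairAppend_fold (f g : List Int → Int) (cols : List (List Int)) :
    cols.foldl (fun acc col => (acc.1 ++ [f col], acc.2 ++ [g col])) ([], [])
      = (cols.map f, cols.map g) := by
  have := PySem.List.foldl_prod_mk (fun a col => a ++ [f col]) (fun a col => a ++ [g col]) cols [] []
  simp only [this]
  rw [PySem.List.foldl_append_singleton_eq_map, PySem.List.foldl_append_singleton_eq_map]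
  simp

-- membership in A's per-column set after the conditional removal of -8
lemma mem_setcol (col : List Int) (x : Int) :
    x ∈ (if PySem.Set.contains (PySem.Set.ofList col) (-8)
          then (PySem.Set.remove? (PySem.Set.ofList col) (-8)).getD (PySem.Set.ofList col)
          else PySem.Set.ofList col)
      ↔ x ∈ col ∧ x ≠ -8 := by
  by_cases h : PySem.Set.contains (PySem.Set.ofList col) (-8)
  · simp only [h, if_pos, PySem.Set.remove?, Option.getD_some]
    simp [PySem.Set.discard, List.mem_filter, PySem.Set.mem_ofList]
  · simp only [h, Bool.false_eq_true, if_false]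
    have h8 : (-8 : Int) ∉ col := by
      intro hm
      exact h (by simpa [PySem.Set.contains, List.contains_iff_mem, PySem.Set.mem_ofList] using
        (PySem.Set.mem_ofList col (-8)).mpr hm)
    rw [PySem.Set.mem_ofList]
    constructor
    · intro hx; exact ⟨hx, fun he => h8 (he ▸ hx)⟩
    · exact fun ⟨hx, _⟩ => hx

lemma max?_congr_mem (l1 l2 : List Int) (h : ∀ x, x ∈ l1 ↔ x ∈ l2) :
    PySem.List.max? l1 (fun x => x) = PySem.List.max? l2 (fun x => x) := by
  match h1 : PySem.List.max? l1 (fun x : Int => x), h2 : PySem.List.max? l2 (fun x : Int => x) with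
  | none, none => rfl
  | none, some m =>
    rw [PySem.List.max?_eq_none_iff] at h1
    have := PySem.List.max?_mem h2
    rw [← h] at this; simp [h1] at this
  | some m, none =>
    rw [PySem.List.max?_eq_none_iff] at h2
    have := PySem.List.max?_mem h1
    rw [h] at this; simp [h2] at this
  | some m1, some m2 =>
    have hm1 := PySem.List.max?_mem h1
    have hm2 := PySem.List.max?_mem h2
    have le1 := PySem.List.max?_isMax h2 m1 ((h m1).mp hm1)
    have le2 := PySem.List.max?_isMax h1 m2 ((h m2).mpr hm2)
    have : m1 = m2 := le_antisymm le1 le2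
    rw [this]

lemma min?_congr_mem (l1 l2 : List Int) (h : ∀ x, x ∈ l1 ↔ x ∈ l2) :
    PySem.List.min? l1 (fun x => x) = PySem.List.min? l2 (fun x => x) := by
  match h1 : PySem.List.min? l1 (fun x : Int => x), h2 : PySem.List.min? l2 (fun x : Int => x) with
  | none, none => rfl
  | none, some m =>
    rw [PySem.List.min?_eq_none_iff] at h1
    have := PySem.List.min?_mem h2
    rw [← h] at this; simp [h1] at this
  | some m, none =>
    rw [PySem.List.min?_eq_none_iff] at h2
    have := PySem.List.min?_mem h1
    rw [h] at this; simp [h2] at this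
  | some m1, some m2 =>
    have hm1 := PySem.List.min?_mem h1
    have hm2 := PySem.List.min?_mem h2
    have le1 := PySem.List.min?_isMin h2 m1 ((h m1).mp hm1)
    have le2 := PySem.List.min?_isMin h1 m2 ((h m2).mpr hm2)
    have : m1 = m2 := le_antisymm le2 le1
    rw [this]

-- B's inner loop over j: both accumulator lists get their first n entries rewritten pointwise
set_option maxRecDepth 10000 in
lemma inner_fold (row : List Int) :
    ∀ (n : Nat) (mx mn : List (Option Int)), n ≤ mx.length → n ≤ mn.length →
      (List.range n).foldl
        (fun st j =>
          if row.getD j 0 = -8 then st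
          else
            (if pvNeedUpd (st.1.getD j none) (fun a b => b < a) (row.getD j 0) then st.1.set j (some (row.getD j 0)) else st.1,
             if pvNeedUpd (st.2.getD j none) (fun a b => a < b) (row.getD j 0) then st.2.set j (some (row.getD j 0)) else st.2))
        (mx, mn)
      = ((List.range n).map (fun j => pvUpMax (mx.getD j none) (row.getD j 0)) ++ mx.drop n,
         (List.range n).map (fun j => pvUpMin (mn.getD j none) (row.getD j 0)) ++ mn.drop n) := by
  intro n
  induction n with
  | zero => intro mx mn _ _; simp
  | succ n ih =>
    intro mx mn hmx hmn
    rw [List.range_succ, List.foldl_append, ih mx mn (by omega) (by omega), List.foldl_cons,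
      List.foldl_nil]
    have hmxn : n < mx.length := by omega
    have hmnn : n < mn.length := by omega
    have hlen1 : ((List.range n).map (fun j => pvUpMax (mx.getD j none) (row.getD j 0))).length = n := by simp
    have hlen2 : ((List.range n).map (fun j => pvUpMin (mn.getD j none) (row.getD j 0))).length = n := by simp
    have hget1 : ((List.range n).map (fun j => pvUpMax (mx.getD j none) (row.getD j 0)) ++ mx.drop n).getD n none
        = mx.getD n none := by
      rw [List.getD_eq_getElem?_getD, List.getElem?_append_right (by omega), hlen1, Nat.sub_self,
        List.getElem?_drop, Nat.add_zero, List.getD_eq_getElem?_getD]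
    have hget2 : ((List.range n).map (fun j => pvUpMin (mn.getD j none) (row.getD j 0)) ++ mn.drop n).getD n none
        = mn.getD n none := by
      rw [List.getD_eq_getElem?_getD, List.getElem?_append_right (by omega), hlen2, Nat.sub_self,
        List.getElem?_drop, Nat.add_zero, List.getD_eq_getElem?_getD]
    have hdrop1 : mx.drop n = mx[n] :: mx.drop (n + 1) := List.drop_eq_getElem_cons hmxn
    have hdrop2 : mn.drop n = mn[n] :: mn.drop (n + 1) := List.drop_eq_getElem_cons hmnn
    have hgd1 : mx.getD n none = mx[n] := by
      simp [List.getD_eq_getElem?_getD, List.getElem?_eq_getElem hmxn]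
    have hgd2 : mn.getD n none = mn[n] := by
      simp [List.getD_eq_getElem?_getD, List.getElem?_eq_getElem hmnn]
    have hset1 : ∀ x : Option Int,
        ((List.range n).map (fun j => pvUpMax (mx.getD j none) (row.getD j 0)) ++ mx.drop n).set n x
          = (List.range n).map (fun j => pvUpMax (mx.getD j none) (row.getD j 0)) ++ x :: mx.drop (n + 1) := by
      intro x
      rw [List.set_append, hlen1, if_neg (lt_irrefl n), Nat.sub_self,
        List.drop_eq_getElem_cons hmxn, List.set_cons_zero]
    have hset2 : ∀ x : Option Int,
        ((List.range n).map (fun j => pvUpMin (mn.getD j none) (row.getD j 0)) ++ mn.drop n).set n x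
          = (List.range n).map (fun j => pvUpMin (mn.getD j none) (row.getD j 0)) ++ x :: mn.drop (n + 1) := by
      intro x
      rw [List.set_append, hlen2, if_neg (lt_irrefl n), Nat.sub_self,
        List.drop_eq_getElem_cons hmnn, List.set_cons_zero]
    rw [List.map_append, List.map_append, List.map_singleton, List.map_singleton,
      List.append_assoc, List.append_assoc, List.singleton_append, List.singleton_append]
    by_cases h8 : row.getD n 0 = -8
    · rw [if_pos h8]
      have e1 : pvUpMax (mx.getD n none) (row.getD n 0) = mx.getD n none := by
        unfold pvUpMax; rw [if_pos h8]
      have e2 : pvUpMin (mn.getD n none) (row.getD n 0) = mn.getD n none := by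
        unfold pvUpMin; rw [if_pos h8]
      rw [e1, e2, hgd1, hgd2, List.getElem_cons_drop, List.getElem_cons_drop]
    · rw [if_neg h8]
      dsimp only
      simp only [hget1, hget2]
      have e1 : pvUpMax (mx.getD n none) (row.getD n 0)
          = if pvNeedUpd (mx.getD n none) (fun a b => b < a) (row.getD n 0)
            then some (row.getD n 0) else mx.getD n none := by
        unfold pvUpMax; rw [if_neg h8]
      have e2 : pvUpMin (mn.getD n none) (row.getD n 0)
          = if pvNeedUpd (mn.getD n none) (fun a b => a < b) (row.getD n 0)
            then some (row.getD n 0) else mn.getD n none := by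
        unfold pvUpMin; rw [if_neg h8]
      rw [e1, e2, Prod.mk.injEq]
      constructor
      · by_cases c1 : pvNeedUpd (mx.getD n none) (fun a b => b < a) (row.getD n 0) = true
        · rw [if_pos c1, if_pos c1, hset1]
        · rw [if_neg c1, if_neg c1, hgd1, List.getElem_cons_drop]
      · by_cases c2 : pvNeedUpd (mn.getD n none) (fun a b => a < b) (row.getD n 0) = true
        · rw [if_pos c2, if_pos c2, hset2]
        · rw [if_neg c2, if_neg c2, hgd2, List.getElem_cons_drop]

lemma getD_map_range {α : Type} (f : Nat → α) (n j : Nat) (h : j < n) (d : α) :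
    ((List.range n).map f).getD j d = f j := by
  rw [List.getD_eq_getElem?_getD, List.getElem?_map]
  simp [List.getElem?_range h]

-- B's row loop computes, per column, the pvUpMax/pvUpMin folds over that column
lemma rows_fold (n : Nat) :
    ∀ (rows : List (List Int)) (mx mn : List (Option Int)), mx.length = n → mn.length = n →
      rows.foldl
        (fun st row =>
          (List.range n).foldl
            (fun st j =>
              if row.getD j 0 = -8 then st
              else
                (if pvNeedUpd (st.1.getD j none) (fun a b => b < a) (row.getD j 0) then st.1.set j (some (row.getD j 0)) else st.1,
                 if pvNeedUpd (st.2.getD j none) (fun a b => a < b) (row.getD j 0) then st.2.set j (some (row.getD j 0)) else st.2))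
            st)
        (mx, mn)
      = ((List.range n).map (fun j => (pvCol rows j).foldl pvUpMax (mx.getD j none)),
         (List.range n).map (fun j => (pvCol rows j).foldl pvUpMin (mn.getD j none))) := by
  intro rows
  induction rows with
  | nil =>
    intro mx mn hmx hmn
    simp only [List.foldl_nil, pvCol, List.map_nil, Prod.mk.injEq]
    constructor <;>
    · apply List.ext_getElem
      · simp; omega
      · intro j h1 h2
        simp only [List.getElem_map, List.getElem_range]
        rw [List.getD_eq_getElem?_getD, List.getElem?_eq_getElem h1]
        rfl
  | cons row rest ih =>
    intro mx mn hmx hmn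
    rw [List.foldl_cons]
    rw [inner_fold row n mx mn (by omega) (by omega),
      List.drop_eq_nil_of_le (by omega), List.drop_eq_nil_of_le (by omega),
      List.append_nil, List.append_nil, ih _ _ (by simp) (by simp)]
    simp only [Prod.mk.injEq]
    constructor <;>
    · apply List.map_congr_left
      intro j hj
      rw [List.mem_range] at hj
      rw [getD_map_range _ _ _ hj]
      simp [pvCol]

-- the pvUpMax/pvUpMin one-step updates, as max/min
lemma upmax_some (m v : Int) (h : v ≠ -8) : pvUpMax (some m) v = some (max m v) := by
  simp only [pvUpMax, pvNeedUpd, if_neg h]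
  by_cases hc : m < v
  · simp [hc, max_eq_right (le_of_lt hc)]
  · have hmax : max m v = m := max_eq_left (by omega)
    simp [hc, hmax]

lemma upmin_some (m v : Int) (h : v ≠ -8) : pvUpMin (some m) v = some (min m v) := by
  simp only [pvUpMin, pvNeedUpd, if_neg h]
  by_cases hc : v < m
  · simp [hc, min_eq_right (le_of_lt hc)]
  · have hmin : min m v = m := min_eq_left (by omega)
    simp [hc, hmin]

lemma upmax_fold_some (col : List Int) : ∀ m : Int,
    col.foldl pvUpMax (some m) = some ((col.filter (fun v => !(v == -8))).foldl max m) := by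
  induction col with
  | nil => simp
  | cons v t ih =>
    intro m
    by_cases h : v = -8
    · subst h; simpa [pvUpMax] using ih m
    · simp only [List.foldl_cons, upmax_some m v h, List.filter_cons]
      simp [h, ih (max m v)]

lemma upmin_fold_some (col : List Int) : ∀ m : Int,
    col.foldl pvUpMin (some m) = some ((col.filter (fun v => !(v == -8))).foldl min m) := by
  induction col with
  | nil => simp
  | cons v t ih =>
    intro m
    by_cases h : v = -8
    · subst h; simpa [pvUpMin] using ih m
    · simp only [List.foldl_cons, upmin_some m v h, List.filter_cons]
      simp [h, ih (min m v)]

-- the pvUpMax/pvUpMin folds from none, characterised by the filtered column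
lemma upmax_fold_none (col : List Int) :
    col.foldl pvUpMax none
      = match col.filter (fun v => !(v == -8)) with
        | [] => none
        | x :: t => some (t.foldl max x) := by
  induction col with
  | nil => simp
  | cons v t ih =>
    by_cases h : v = -8
    · subst h; simpa [pvUpMax] using ih
    · have : pvUpMax none v = some v := by simp [pvUpMax, pvNeedUpd, h]
      simp [this, h, upmax_fold_some]

lemma upmin_fold_none (col : List Int) :
    col.foldl pvUpMin none
      = match col.filter (fun v => !(v == -8)) with
        | [] => none
        | x :: t => some (t.foldl min x) := by
  induction col with
  | nil => simp
  | cons v t ih =>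
    by_cases h : v = -8
    · subst h; simpa [pvUpMin] using ih
    · have : pvUpMin none v = some v := by simp [pvUpMin, pvNeedUpd, h]
      simp [this, h, upmin_fold_some]

-- both programs compute, per column j, the max and min of the filtered column
lemma ports_agree (data : List (List Int)) (hpre : Pre_get_column_distribution data) :
    get_column_distribution data = get_column_distribution_alt data := by
  set F : Nat → List Int := fun j => (pvCol data j).filter (fun v => !(v == -8)) with hF
  set P : Nat → Int × Int := fun j =>
    (((F j).tail).foldl max ((F j).headD 0), ((F j).tail).foldl min ((F j).headD 0)) with hP
  have hFne : ∀ j < pvNcols data, F j ≠ [] := by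
    intro j hj
    obtain ⟨r, hr, hv⟩ := hpre j hj
    have : r.getD j 0 ∈ F j := by
      simp only [hF, List.mem_filter]
      exact ⟨List.mem_map_of_mem hr, by simpa using hv⟩
    intro he; rw [he] at this; exact absurd this (List.not_mem_nil)
  have hA : get_column_distribution data
      = ((List.range (pvNcols data)).map (fun j => (P j).1),
         (List.range (pvNcols data)).map (fun j => (P j).2)) := by
    unfold get_column_distribution
    rw [pyZipStar_eq, pairAppend_fold, List.map_map, List.map_map, Prod.mk.injEq]
    refine ⟨?_, ?_⟩ <;>
    · apply List.map_congr_left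
      intro j hj
      rw [List.mem_range] at hj
      have hmem : ∀ x, x ∈ (if PySem.Set.contains (PySem.Set.ofList (pvCol data j)) (-8)
            then (PySem.Set.remove? (PySem.Set.ofList (pvCol data j)) (-8)).getD (PySem.Set.ofList (pvCol data j))
            else PySem.Set.ofList (pvCol data j)) ↔ x ∈ F j := by
        intro x
        rw [mem_setcol, hF]
        simp [List.mem_filter]
      obtain ⟨x, t, hxt⟩ := List.exists_cons_of_ne_nil (hFne j hj)
      simp only [Function.comp]
      first
      | rw [max?_congr_mem _ _ hmem]
      | rw [min?_congr_mem _ _ hmem]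
      rw [hxt]
      first
      | rw [PySem.List.max?_id_cons]
      | rw [PySem.List.min?_id_cons]
      simp [hP, hxt]
  have hB : get_column_distribution_alt data
      = ((List.range (pvNcols data)).map (fun j => (P j).1),
         (List.range (pvNcols data)).map (fun j => (P j).2)) := by
    unfold get_column_distribution_alt
    dsimp only
    rw [pvNcolsB_eq]
    rw [rows_fold (pvNcols data) data _ _ (by simp) (by simp)]
    simp only [List.map_map, Prod.mk.injEq]
    constructor <;>
    · apply List.map_congr_left
      intro j hj
      rw [List.mem_range] at hj
      obtain ⟨x, t, hxt⟩ := List.exists_cons_of_ne_nil (hFne j hj)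
      have hrep : (List.replicate (pvNcols data) (none : Option Int)).getD j none = none := by
        simp [List.getD_eq_getElem?_getD, hj]
      have hFj : List.filter (fun v => !(v == -8)) (pvCol data j) = x :: t := by
        rw [hF] at hxt; exact hxt
      simp only [Function.comp, hrep]
      first
      | rw [upmax_fold_none, hFj]
      | rw [upmin_fold_none, hFj]
      simp [hP, hxt]
  rw [hA, hB]

-- ===== VERDICT (by name: the statement is the Claim_ definition above) =====
theorem get_column_distribution_spec : Claim_equal_get_column_distribution := by
  intro data _ hpre
  unfold Spec_get_column_distribution
  exact ports_agree data hpre
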